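-- pv_equiv track=rewrite | github.com/pypi-data/pypi-mirror-96 | packages/foliantcontrib.utils.header-anchors/foliantcontrib.utils.header_anchors-1.0.4-py3-none-any.whl/foliant/preprocessors/utils/header_anchors.py | to_id_pandoc
-- ===== SOURCE A (Python) =====
-- def to_id_pandoc(input_: str) -> str:
--     """
--     Quote from docs:
--
--     The default algorithm used to derive the identifier from the heading text is:
--
--         * Remove all formatting, links, etc.
--         * Remove all footnotes.
--         * Remove all non-alphanumeric characters, except underscores, hyphens, and periods.
--         * Replace all spaces and newlines with hyphens.
--         * Convert all alphabetic characters to lowercase.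
--         * Remove everything up to the first letter (identifiers may not begin with a number or punctuation mark).
--         * If nothing is left after this, use the identifier section.
--     """
--     def accept(char: str) -> bool:
--         if char in ALPHA:
--             return True
--         elif char.isalpha():
--             return True
--         elif char.isdigit():
--             return True
--         return False
--     ALPHA = '_-.'
--     result = ''
--     source = input_.lower()
--     accum = False
--
--     # strip everything before first letter
--     while source and not source[0].isalpha():
--         source = source[1:]
--
--     for char in source:
--         if accept(char):
--             if accum:
--                 accum = False
--                 result += f'-{char.lower()}'
--             else:
--                 result += char.lower()
--         elif char.isspace():
--             accum = True
--         else: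
--             pass
--
--     if not result:
--         return 'section'
--     else:
--         return result
-- ===== SOURCE B (Python) =====
-- def to_id_pandoc(input_: str) -> str:
--     s = input_.lower()
--     start = next((i for i, c in enumerate(s) if c.isalpha()), None)
--     if start is None:
--         return 'section'
--     filtered = ''.join(c for c in s[start:]
--                        if c.isspace() or c in '_-.' or c.isalpha() or c.isdigit())
--     return '-'.join(filtered.split()) or 'section'
-- ===== Notes on version B (the rewrite author's own statement) =====
-- stated objective: idiomatic
-- what changed: A's single character loop with a pending-hyphen accumulator flag is replaced by a filter (keep whitespace and accepted characters) followed by str.split() and a hyphen join, which collapses whitespace runs declaratively; the leading strip becomes a find-first-alpha index and slice.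
import Mathlib
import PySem

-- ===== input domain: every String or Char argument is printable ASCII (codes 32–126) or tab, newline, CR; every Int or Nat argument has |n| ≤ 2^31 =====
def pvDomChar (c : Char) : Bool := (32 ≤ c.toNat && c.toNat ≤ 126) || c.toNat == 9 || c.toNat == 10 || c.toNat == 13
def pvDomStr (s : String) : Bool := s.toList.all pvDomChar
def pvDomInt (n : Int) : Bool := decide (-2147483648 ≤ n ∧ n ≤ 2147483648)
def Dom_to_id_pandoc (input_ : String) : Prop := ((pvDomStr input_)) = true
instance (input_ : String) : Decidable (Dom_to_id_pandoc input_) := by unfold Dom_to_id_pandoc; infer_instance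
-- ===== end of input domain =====

-- B replaces A's accumulator-flag character loop by a filter + split + hyphen-join pipeline (idiomatic; measured faster by a constant factor).

-- ===== PORT A =====
-- accept(char): 'char in ALPHA' / isalpha / isdigit, as A's if-chain
def pvAccept (c : Char) : Bool :=
  if ['_','-','.'].contains c then true
  else if PySem.Chars.isalpha c then true
  else if PySem.Chars.isdigit c then true
  else false

-- A's 'while source and not source[0].isalpha(): source = source[1:]'
def pvStrip : List Char → List Char
  | [] => []
  | c :: cs => if ! PySem.Chars.isalpha c then pvStrip cs else c :: cs

-- A's 'for char in source' loop with state (result, accum)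
def pvLoopA : List Char → List Char → Bool → List Char
  | [], res, _ => res
  | c :: cs, res, accum =>
    if pvAccept c then
      if accum then pvLoopA cs (res ++ ['-', PySem.Chars.lowerChar c]) false
      else pvLoopA cs (res ++ [PySem.Chars.lowerChar c]) false
    else if PySem.Chars.isspace c then pvLoopA cs res true
    else pvLoopA cs res accum

def to_id_pandoc (input_ : String) : String :=
  let source := pvStrip (PySem.Chars.lower input_.toList)
  let result := pvLoopA source [] false
  if result = [] then "section" else String.ofList result

-- ===== PORT B =====
-- B's filter predicate: whitespace or accepted
def pvKeep (c : Char) : Bool :=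
  PySem.Chars.isspace c || ['_','-','.'].contains c || PySem.Chars.isalpha c || PySem.Chars.isdigit c

def to_id_pandoc_alt (input_ : String) : String :=
  let s := PySem.Chars.lower input_.toList
  match s.findIdx? PySem.Chars.isalpha with
  | none => "section"
  | some i =>
    let filtered := (s.drop i).filter pvKeep
    let r := PySem.Chars.join ['-'] (PySem.Chars.split₀ filtered)
    if r = [] then "section" else String.ofList r

-- ===== PRECONDITION & SPEC =====
def Spec_to_id_pandoc (input_ : String) (out : String) : Prop := out = to_id_pandoc_alt input_
instance (input_ : String) (out : String) : Decidable (Spec_to_id_pandoc input_ out) := by unfold Spec_to_id_pandoc; infer_instance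

-- ===== CLAIM (what is proved, stated in full; the proofs are below) =====
def Claim_equal_to_id_pandoc : Prop := ∀ (input_ : String), Dom_to_id_pandoc input_ → Spec_to_id_pandoc input_ (to_id_pandoc input_)

-- ===== LEMMAS AND PROOFS =====

lemma charLeNat (a c : Char) : (a ≤ c) ↔ a.toNat ≤ c.toNat := by
  rw [Char.le_def, UInt32.le_iff_toNat_le]; exact Iff.rfl

lemma charEqNat (a c : Char) : (a = c) ↔ a.toNat = c.toNat := by
  constructor
  · intro h; rw [h]
  · intro h; exact Char.ext (UInt32.toNat_inj.mp h)

lemma accept_or (c : Char) : pvAccept c =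
    (['_','-','.'].contains c || PySem.Chars.isalpha c || PySem.Chars.isdigit c) := by
  unfold pvAccept; split_ifs <;> simp_all

lemma accept_iff (c : Char) : pvAccept c = true ↔
    (c.toNat = 95 ∨ c.toNat = 45 ∨ c.toNat = 46) ∨ (65 ≤ c.toNat ∧ c.toNat ≤ 90)
    ∨ (97 ≤ c.toNat ∧ c.toNat ≤ 122) ∨ (48 ≤ c.toNat ∧ c.toNat ≤ 57) := by
  rw [accept_or]
  unfold PySem.Chars.isalpha PySem.Chars.isupper PySem.Chars.islower PySem.Chars.isdigit
  simp only [List.contains_cons, List.contains_nil, Bool.or_eq_true, beq_iff_eq,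
      Bool.and_eq_true, decide_eq_true_eq, charEqNat, charLeNat,
      show '_'.toNat = 95 from rfl, show '-'.toNat = 45 from rfl, show '.'.toNat = 46 from rfl,
      show 'A'.toNat = 65 from rfl, show 'Z'.toNat = 90 from rfl,
      show 'a'.toNat = 97 from rfl, show 'z'.toNat = 122 from rfl,
      show '0'.toNat = 48 from rfl, show '9'.toNat = 57 from rfl]
  tauto

lemma isspace_iff (c : Char) : PySem.Chars.isspace c = true ↔
    (c.toNat = 32 ∨ (9 ≤ c.toNat ∧ c.toNat ≤ 13) ∨ (28 ≤ c.toNat ∧ c.toNat ≤ 31) ∨ c.toNat = 133 ∨ c.toNat = 160 ∨ c.toNat = 5760 ∨ (8192 ≤ c.toNat ∧ c.toNat ≤ 8202) ∨ c.toNat = 8232 ∨ c.toNat = 8233 ∨ c.toNat = 8239 ∨ c.toNat = 8287 ∨ c.toNat = 12288) := by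
  unfold PySem.Chars.isspace
  simp only [Bool.or_eq_true, Bool.and_eq_true, decide_eq_true_eq]
  tauto

lemma nospace (c : Char) (h : PySem.Chars.isspace c = true) : pvAccept c = false := by
  rw [Bool.eq_false_iff, Ne, accept_iff]; rw [isspace_iff] at h; omega

lemma isalpha_iff (c : Char) : PySem.Chars.isalpha c = true ↔
    (65 ≤ c.toNat ∧ c.toNat ≤ 90) ∨ (97 ≤ c.toNat ∧ c.toNat ≤ 122) := by
  unfold PySem.Chars.isalpha PySem.Chars.isupper PySem.Chars.islower
  simp only [Bool.or_eq_true, Bool.and_eq_true, decide_eq_true_eq, charLeNat,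
      show 'A'.toNat = 65 from rfl, show 'Z'.toNat = 90 from rfl,
      show 'a'.toNat = 97 from rfl, show 'z'.toNat = 122 from rfl]

lemma accept_of_alpha (c : Char) (h : PySem.Chars.isalpha c = true) : pvAccept c = true := by
  rw [accept_iff]; rw [isalpha_iff] at h; omega

lemma lowerChar_fix (c : Char) : PySem.Chars.lowerChar (PySem.Chars.lowerChar c) = PySem.Chars.lowerChar c := by
  unfold PySem.Chars.lowerChar PySem.Chars.isupper
  split_ifs with h1 h2
  · exfalso
    simp only [Bool.and_eq_true, decide_eq_true_eq, charLeNat,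
      show 'A'.toNat = 65 from rfl, show 'Z'.toNat = 90 from rfl] at h1 h2
    rw [Char.toNat_ofNat, if_pos (by unfold Nat.isValidChar; omega)] at h2
    omega
  · rfl
  · rfl

lemma mem_lower_fix {c : Char} {xs : List Char} (h : c ∈ PySem.Chars.lower xs) :
    PySem.Chars.lowerChar c = c := by
  unfold PySem.Chars.lower at h
  obtain ⟨d, _, rfl⟩ := List.mem_map.mp h
  exact lowerChar_fix d

lemma keep_iff (c : Char) : pvKeep c = (PySem.Chars.isspace c || pvAccept c) := by
  rw [accept_or]; unfold pvKeep; cases PySem.Chars.isspace c <;> simp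

-- the word list represented by split₀.go's state
def pvWords (cur : List Char) (acc : List (List Char)) : List (List Char) :=
  acc.reverse ++ (if cur.isEmpty then [] else [cur.reverse])

lemma join_snoc (ws : List (List Char)) (w : List Char) :
    PySem.Chars.join ['-'] (ws ++ [w]) =
      PySem.Chars.join ['-'] ws ++ (if ws.isEmpty then [] else ['-']) ++ w := by
  induction ws with
  | nil => simp [PySem.Chars.join_singleton, PySem.Chars.join_nil]
  | cons a t ih =>
    cases t with
    | nil => simp [PySem.Chars.join_cons_cons, PySem.Chars.join_singleton]
    | cons b t2 =>
      simp only [List.cons_append, PySem.Chars.join_cons_cons, List.isEmpty_cons] at *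
      simp [ih]

lemma loop_filter (u : List Char) : ∀ (res : List Char) (accum : Bool),
    pvLoopA u res accum = pvLoopA (u.filter pvKeep) res accum := by
  induction u with
  | nil => intro res accum; rfl
  | cons c rest ih =>
    intro res accum
    by_cases hk : pvKeep c = true
    · rw [List.filter_cons_of_pos hk]
      unfold pvLoopA
      split_ifs <;> apply ih
    · rw [List.filter_cons_of_neg (by simpa using hk)]
      have h2 : pvAccept c = false ∧ PySem.Chars.isspace c = false := by
        rw [keep_iff] at hk
        cases h1 : PySem.Chars.isspace c <;> cases h3 : pvAccept c <;> simp_all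
      conv_lhs => rw [pvLoopA]
      rw [if_neg (by simp [h2.1]), if_neg (by simp [h2.2])]
      exact ih res accum

lemma loop_go (u : List Char) : ∀ (cur : List Char) (acc : List (List Char)) (res : List Char) (accum : Bool),
    (∀ c ∈ u, pvKeep c = true ∧ PySem.Chars.lowerChar c = c) →
    res = PySem.Chars.join ['-'] (pvWords cur acc) →
    (cur.isEmpty = true → accum = true ∧ acc ≠ []) →
    (accum = true → cur.isEmpty = true) →
    pvLoopA u res accum = PySem.Chars.join ['-'] (PySem.Chars.split₀.go u cur acc) := by
  induction u with
  | nil =>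
    intro cur acc res accum _ hres hcur _
    rw [pvLoopA, PySem.Chars.split₀.go, hres]
    unfold pvWords
    cases hc : cur.isEmpty <;> simp [List.reverse_cons]
  | cons c rest ih =>
    intro cur acc res accum hmem hres hcur haccum
    obtain ⟨hkc, hlc⟩ := hmem c (List.mem_cons_self ..)
    have hmem' : ∀ x ∈ rest, pvKeep x = true ∧ PySem.Chars.lowerChar x = x :=
      fun x hx => hmem x (List.mem_cons_of_mem _ hx)
    by_cases ha : pvAccept c = true
    · have hs : PySem.Chars.isspace c = false := by
        cases h : PySem.Chars.isspace c
        · rfl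
        · exact absurd ha (by simp [nospace c h])
      conv_lhs => rw [pvLoopA]
      rw [if_pos ha, PySem.Chars.split₀.go,
        if_neg (show ¬(PySem.Chars.isspace c = true) by simp [hs])]
      by_cases hacc : accum = true
      · have hc : cur = [] := by simpa [List.isEmpty_iff] using haccum hacc
        have hanil : acc ≠ [] := (hcur (by simp [hc])).2
        subst hc
        have hre : acc.reverse.isEmpty = false := by simp [hanil]
        rw [if_pos hacc, hlc]
        refine ih _ _ _ _ hmem' ?_ (by simp) (by simp)
        rw [hres]; unfold pvWords
        simp [join_snoc, hre]
      · have hc : cur.isEmpty = false := by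
          cases h : cur.isEmpty
          · rfl
          · exact absurd (hcur h).1 hacc
        rw [if_neg hacc, hlc]
        refine ih _ _ _ _ hmem' ?_ (by simp) (by simp)
        rw [hres]; unfold pvWords
        simp [hc, join_snoc, List.reverse_cons]
    · have hs : PySem.Chars.isspace c = true := by
        rw [keep_iff] at hkc
        cases h : PySem.Chars.isspace c <;> simp_all
      conv_lhs => rw [pvLoopA]
      rw [if_neg (show ¬(pvAccept c = true) by simp [ha]), if_pos hs,
        PySem.Chars.split₀.go, if_pos hs]
      cases hc : cur.isEmpty
      · rw [if_neg (show ¬(false = true) by simp)]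
        refine ih _ _ _ _ hmem' ?_ (fun _ => ⟨rfl, by simp⟩) (fun _ => rfl)
        rw [hres]; unfold pvWords
        simp [hc, List.reverse_cons]
      · have hc' : cur = [] := by simpa [List.isEmpty_iff] using hc
        subst hc'
        rw [if_pos rfl]
        have hacc : accum = true := (hcur rfl).1
        subst hacc
        exact ih _ _ _ _ hmem' hres hcur haccum

lemma strip_none (s : List Char) (h : s.findIdx? PySem.Chars.isalpha = none) :
    pvStrip s = [] := by
  induction s with
  | nil => rfl
  | cons c cs ih =>
    rw [List.findIdx?_cons] at h
    by_cases hc : PySem.Chars.isalpha c = true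
    · rw [if_pos hc] at h; exact absurd h (by simp)
    · rw [if_neg hc] at h
      rw [pvStrip, if_pos (by simp [hc])]
      exact ih (by simpa using h)

lemma strip_some (s : List Char) : ∀ i, s.findIdx? PySem.Chars.isalpha = some i →
    pvStrip s = s.drop i ∧ ∃ c rest, s.drop i = c :: rest ∧ PySem.Chars.isalpha c = true := by
  induction s with
  | nil => intro i h; simp at h
  | cons c cs ih =>
    intro i h
    rw [List.findIdx?_cons] at h
    by_cases hc : PySem.Chars.isalpha c = true
    · rw [if_pos hc] at h
      obtain rfl : i = 0 := by simpa using h.symm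
      refine ⟨by rw [pvStrip, if_neg (by simp [hc])]; simp, c, cs, by simp, hc⟩
    · rw [if_neg hc] at h
      obtain ⟨j, hj, rfl⟩ : ∃ j, cs.findIdx? PySem.Chars.isalpha = some j ∧ i = j + 1 := by
        cases hfi : cs.findIdx? PySem.Chars.isalpha with
        | none => rw [hfi] at h; simp at h
        | some j => rw [hfi] at h; exact ⟨j, rfl, by simpa using h.symm⟩
      obtain ⟨h1, h2⟩ := ih j hj
      exact ⟨by rw [pvStrip, if_pos (by simp [hc])]; simpa using h1, by simpa using h2⟩

-- ===== VERDICT (by name: the statement is the Claim_ definition above) =====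
theorem to_id_pandoc_spec : Claim_equal_to_id_pandoc := by
  unfold Claim_equal_to_id_pandoc Spec_to_id_pandoc
  intro input _
  unfold to_id_pandoc to_id_pandoc_alt
  cases hfi : (PySem.Chars.lower input.toList).findIdx? PySem.Chars.isalpha with
  | none =>
    rw [strip_none _ hfi]
    simp [pvLoopA, hfi]
  | some i =>
    obtain ⟨hstrip, c, rest, hdrop, halpha⟩ := strip_some _ i hfi
    have ha : pvAccept c = true := accept_of_alpha c halpha
    have hsp : PySem.Chars.isspace c = false := by
      cases h : PySem.Chars.isspace c
      · rfl
      · exact absurd ha (by simp [nospace c h])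
    have hkc : pvKeep c = true := by rw [keep_iff, ha]; simp
    have hfixdrop : ∀ x ∈ (PySem.Chars.lower input.toList).drop i, PySem.Chars.lowerChar x = x :=
      fun x hx => mem_lower_fix (List.mem_of_mem_drop hx)
    have hfixc : PySem.Chars.lowerChar c = c := hfixdrop c (by rw [hdrop]; exact List.mem_cons_self ..)
    -- A side: first step of the loop, then drop the ignored characters
    have hA : pvLoopA (pvStrip (PySem.Chars.lower input.toList)) [] false
        = pvLoopA (rest.filter pvKeep) [c] false := by
      rw [hstrip, hdrop, pvLoopA, if_pos ha, if_neg (by simp), hfixc]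
      rw [loop_filter]
      rfl
    -- B side: split₀ consumes the first character into cur
    have hB : PySem.Chars.split₀ (((PySem.Chars.lower input.toList).drop i).filter pvKeep)
        = PySem.Chars.split₀.go (rest.filter pvKeep) [c] [] := by
      rw [hdrop, List.filter_cons_of_pos hkc]
      unfold PySem.Chars.split₀
      rw [PySem.Chars.split₀.go, if_neg (show ¬(PySem.Chars.isspace c = true) by simp [hsp])]
    have hmemf : ∀ x ∈ rest.filter pvKeep, pvKeep x = true ∧ PySem.Chars.lowerChar x = x := by
      intro x hx
      refine ⟨List.of_mem_filter hx, ?_⟩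
      exact hfixdrop x (by rw [hdrop]; exact List.mem_cons_of_mem _ (List.mem_of_mem_filter hx))
    have hmain : pvLoopA (rest.filter pvKeep) [c] false
        = PySem.Chars.join ['-'] (PySem.Chars.split₀.go (rest.filter pvKeep) [c] []) := by
      refine loop_go _ _ _ _ _ hmemf ?_ (by simp) (by simp)
      unfold pvWords
      simp [PySem.Chars.join_singleton]
    simp only [hfi]
    rw [hB, hA, hmain]
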